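-- pv_equiv track=rewrite | github.com/liuxsh9/sft-label | src/sft_label/preprocessing.py | _choose_inheritance_source
-- ===== SOURCE A (Python) =====
-- def _path_has_hard_boundary(hard_edges, left_pos, right_pos):
--     """Check whether any adjacent hop on the path crosses a hard boundary."""
--     lo = min(left_pos, right_pos) + 1
--     hi = max(left_pos, right_pos)
--     for pos in range(lo, hi + 1):
--         if 0 <= pos < len(hard_edges) and hard_edges[pos]:
--             return True
--     return False
--
-- def _choose_inheritance_source(pos_in_group, labeled_positions, hard_edges):
--     """Prefer forward inheritance, but fall back backward when it is the only soft path."""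
--     source_pos = None
--     for lp in labeled_positions:
--         if lp > pos_in_group and not _path_has_hard_boundary(hard_edges, pos_in_group, lp):
--             source_pos = lp
--             break
--     if source_pos is not None:
--         return source_pos
--
--     for lp in reversed(labeled_positions):
--         if lp < pos_in_group and not _path_has_hard_boundary(hard_edges, pos_in_group, lp):
--             return lp
--     return None
-- ===== SOURCE B (Python) =====
-- def _choose_inheritance_source(pos_in_group, labeled_positions, hard_edges):
--     """Single pass: precompute the nearest hard edge on each side of pos_in_group,
--     then each candidate is checked in O(1) instead of walking its whole path."""
--     n = len(hard_edges)
--     first_hard_right = None  # smallest hard index > pos_in_group (within bounds)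
--     for p in range(max(pos_in_group + 1, 0), n):
--         if hard_edges[p]:
--             first_hard_right = p
--             break
--     last_hard_left = None  # largest hard index <= pos_in_group (within bounds)
--     for p in range(min(pos_in_group, n - 1), -1, -1):
--         if hard_edges[p]:
--             last_hard_left = p
--             break
--     for lp in labeled_positions:
--         if lp > pos_in_group and (first_hard_right is None or lp < first_hard_right):
--             return lp
--     best = None
--     for lp in labeled_positions:
--         if lp < pos_in_group and (last_hard_left is None or last_hard_left <= lp):
--             best = lp
--     return best
-- ===== Notes on version B (the rewrite author's own statement) =====
-- stated objective: faster
-- what changed: Instead of re-walking the whole path between pos and every candidate (O(L*D)), B precomputes the nearest hard edge on each side of pos once, so each candidate is accepted or rejected by a single comparison (O(n + L)).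
import Mathlib
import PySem

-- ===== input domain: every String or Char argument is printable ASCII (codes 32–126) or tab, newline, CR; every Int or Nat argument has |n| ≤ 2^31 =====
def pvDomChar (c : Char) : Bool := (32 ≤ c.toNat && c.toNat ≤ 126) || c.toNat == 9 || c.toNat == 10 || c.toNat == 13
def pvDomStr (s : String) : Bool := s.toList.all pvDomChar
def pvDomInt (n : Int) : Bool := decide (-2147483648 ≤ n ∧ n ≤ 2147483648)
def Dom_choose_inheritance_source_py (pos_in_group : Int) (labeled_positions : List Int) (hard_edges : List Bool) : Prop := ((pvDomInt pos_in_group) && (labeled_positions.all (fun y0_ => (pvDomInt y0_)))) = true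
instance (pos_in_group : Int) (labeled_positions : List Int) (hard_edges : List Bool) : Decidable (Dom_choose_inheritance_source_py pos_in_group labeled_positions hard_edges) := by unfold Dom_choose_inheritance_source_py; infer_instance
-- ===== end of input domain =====

-- B replaces A's per-candidate path walk by a one-time scan for the nearest hard
-- edge on each side of pos_in_group, making each candidate test O(1): faster.

-- ===== PORT A =====
def pathHasHardBoundary (hard_edges : List Bool) (left_pos right_pos : Int) : Bool :=
  let lo := min left_pos right_pos + 1
  let hi := max left_pos right_pos
  (PySem.List.pyRange lo (hi + 1) 1).any (fun pos =>
    (decide (0 ≤ pos) && decide (pos < (hard_edges.length : Int))) &&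
      (PySem.List.pyGet? hard_edges pos).getD false)

def choose_inheritance_source_py (pos_in_group : Int) (labeled_positions : List Int) (hard_edges : List Bool) : Option Int :=
  let source_pos := labeled_positions.find? (fun lp =>
    decide (pos_in_group < lp) && !(pathHasHardBoundary hard_edges pos_in_group lp))
  match source_pos with
  | some s => some s
  | none => labeled_positions.reverse.find? (fun lp =>
      decide (lp < pos_in_group) && !(pathHasHardBoundary hard_edges pos_in_group lp))

-- ===== PORT B =====
def choose_inheritance_source_py_alt (pos_in_group : Int) (labeled_positions : List Int) (hard_edges : List Bool) : Option Int :=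
  let n : Int := hard_edges.length
  let firstHardRight := (PySem.List.pyRange (max (pos_in_group + 1) 0) n 1).find?
    (fun p => (PySem.List.pyGet? hard_edges p).getD false)
  let lastHardLeft := (PySem.List.pyRange (min pos_in_group (n - 1)) (-1) (-1)).find?
    (fun p => (PySem.List.pyGet? hard_edges p).getD false)
  match labeled_positions.find? (fun lp =>
      decide (pos_in_group < lp) &&
        (match firstHardRight with | none => true | some f => decide (lp < f))) with
  | some lp => some lp
  | none =>
    labeled_positions.foldl (fun best lp =>
      if decide (lp < pos_in_group) &&
          (match lastHardLeft with | none => true | some g => decide (g ≤ lp)) then some lp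
      else best) none

-- ===== PRECONDITION & SPEC =====
def Spec_choose_inheritance_source_py (pos_in_group : Int) (labeled_positions : List Int) (hard_edges : List Bool) (out : Option Int) : Prop := out = choose_inheritance_source_py_alt pos_in_group labeled_positions hard_edges
instance (pos_in_group : Int) (labeled_positions : List Int) (hard_edges : List Bool) (out : Option Int) : Decidable (Spec_choose_inheritance_source_py pos_in_group labeled_positions hard_edges out) := by unfold Spec_choose_inheritance_source_py; infer_instance

-- ===== CLAIM (what is proved, stated in full; the proofs are below) =====
def Claim_equal_choose_inheritance_source_py : Prop := ∀ (pos_in_group : Int) (labeled_positions : List Int) (hard_edges : List Bool), Dom_choose_inheritance_source_py pos_in_group labeled_positions hard_edges → Spec_choose_inheritance_source_py pos_in_group labeled_positions hard_edges (choose_inheritance_source_py pos_in_group labeled_positions hard_edges)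

-- ===== LEMMAS AND PROOFS =====

-- find? on an ascending unit range returns the least element satisfying q
lemma find?_pyRange_one_some (q : Int → Bool) :
    ∀ (k : Nat) (a b f : Int), (b - a).toNat = k →
      (PySem.List.pyRange a b 1).find? q = some f →
      a ≤ f ∧ f < b ∧ q f = true ∧ ∀ p, a ≤ p → p < f → q p = false := by
  intro k
  induction k with
  | zero =>
    intro a b f hk hf
    rw [PySem.List.pyRange_one_eq_nil (by omega)] at hf
    simp at hf
  | succ k ih =>
    intro a b f hk hf
    have hab : a < b := by omega
    rw [PySem.List.pyRange_one_cons hab, List.find?_cons] at hf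
    cases hqa : q a with
    | true =>
      rw [hqa] at hf
      simp only [Option.some.injEq] at hf
      subst hf
      exact ⟨le_refl a, hab, hqa, fun p hp1 hp2 => absurd hp2 (not_lt.mpr hp1)⟩
    | false =>
      rw [hqa] at hf
      obtain ⟨h1, h2, h3, h4⟩ := ih (a + 1) b f (by omega) hf
      refine ⟨by omega, h2, h3, fun p hp1 hp2 => ?_⟩
      by_cases hpa : p = a
      · exact hpa ▸ hqa
      · exact h4 p (by omega) hp2

-- find? on a descending range(a, b, -1) returns the greatest element satisfying q
lemma find?_pyRange_neg_one_some (q : Int → Bool) :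
    ∀ (k : Nat) (a b f : Int), (a - b).toNat = k →
      (PySem.List.pyRange a b (-1)).find? q = some f →
      b < f ∧ f ≤ a ∧ q f = true ∧ ∀ p, f < p → p ≤ a → q p = false := by
  intro k
  induction k with
  | zero =>
    intro a b f hk hf
    rw [PySem.List.pyRange_neg_one_eq_nil (by omega)] at hf
    simp at hf
  | succ k ih =>
    intro a b f hk hf
    have hab : b < a := by omega
    rw [PySem.List.pyRange_neg_one_cons hab, List.find?_cons] at hf
    cases hqa : q a with
    | true =>
      rw [hqa] at hf
      simp only [Option.some.injEq] at hf
      subst hf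
      exact ⟨hab, le_refl a, hqa, fun p hp1 hp2 => absurd hp2 (not_le.mpr hp1)⟩
    | false =>
      rw [hqa] at hf
      obtain ⟨h1, h2, h3, h4⟩ := ih (a - 1) b f (by omega) hf
      refine ⟨h1, by omega, h3, fun p hp1 hp2 => ?_⟩
      by_cases hpa : p = a
      · exact hpa ▸ hqa
      · exact h4 p hp1 (by omega)

-- the forward predicates of A and B agree pointwise
lemma fwd_pred_eq (hard_edges : List Bool) (pos_in_group : Int) :
    (fun lp => decide (pos_in_group < lp) && !(pathHasHardBoundary hard_edges pos_in_group lp))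
    = (fun lp => decide (pos_in_group < lp) &&
        (match (PySem.List.pyRange (max (pos_in_group + 1) 0) (hard_edges.length : Int) 1).find?
            (fun p => (PySem.List.pyGet? hard_edges p).getD false) with
         | none => true | some f => decide (lp < f))) := by
  funext lp
  by_cases hpl : pos_in_group < lp
  · simp only [hpl, decide_true, Bool.true_and]
    unfold pathHasHardBoundary
    rw [min_eq_left hpl.le, max_eq_right hpl.le]
    cases hF : (PySem.List.pyRange (max (pos_in_group + 1) 0) (hard_edges.length : Int) 1).find?
        (fun p => (PySem.List.pyGet? hard_edges p).getD false) with
    | none =>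
      have hnone := List.find?_eq_none.mp hF
      simp only [Bool.not_eq_eq_eq_not, Bool.not_true]
      rw [List.any_eq_false]
      intro p hp
      have hmem := (PySem.List.mem_pyRange_one).mp hp
      simp only [Bool.and_eq_true, decide_eq_true_eq, not_and, Bool.not_eq_true]
      intro h0
      simpa using hnone p ((PySem.List.mem_pyRange_one).mpr ⟨by omega, h0.2⟩)
    | some f =>
      obtain ⟨h1, h2, h3, h4⟩ := find?_pyRange_one_some _ _ _ _ _ rfl hF
      by_cases hfl : lp < f
      · simp only [hfl, decide_true, Bool.not_eq_eq_eq_not, Bool.not_true]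
        rw [List.any_eq_false]
        intro p hp
        have hmem := (PySem.List.mem_pyRange_one).mp hp
        simp only [Bool.and_eq_true, decide_eq_true_eq, not_and, Bool.not_eq_true]
        intro h0
        exact h4 p (by omega) (by omega)
      · simp only [hfl, decide_false, Bool.not_eq_eq_eq_not, Bool.not_false]
        rw [List.any_eq_true]
        refine ⟨f, (PySem.List.mem_pyRange_one).mpr ⟨by omega, by omega⟩, ?_⟩
        simp only [Bool.and_eq_true, decide_eq_true_eq]
        exact ⟨⟨by omega, h2⟩, h3⟩
  · simp [hpl]

-- the backward predicates of A and B agree pointwise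
lemma bwd_pred_eq (hard_edges : List Bool) (pos_in_group : Int) :
    (fun lp => decide (lp < pos_in_group) && !(pathHasHardBoundary hard_edges pos_in_group lp))
    = (fun lp => decide (lp < pos_in_group) &&
        (match (PySem.List.pyRange (min pos_in_group ((hard_edges.length : Int) - 1)) (-1) (-1)).find?
            (fun p => (PySem.List.pyGet? hard_edges p).getD false) with
         | none => true | some g => decide (g ≤ lp))) := by
  funext lp
  by_cases hpl : lp < pos_in_group
  · simp only [hpl, decide_true, Bool.true_and]
    unfold pathHasHardBoundary
    rw [min_eq_right hpl.le, max_eq_left hpl.le]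
    cases hG : (PySem.List.pyRange (min pos_in_group ((hard_edges.length : Int) - 1)) (-1) (-1)).find?
        (fun p => (PySem.List.pyGet? hard_edges p).getD false) with
    | none =>
      have hnone := List.find?_eq_none.mp hG
      simp only [Bool.not_eq_eq_eq_not, Bool.not_true]
      rw [List.any_eq_false]
      intro p hp
      have hmem := (PySem.List.mem_pyRange_one).mp hp
      simp only [Bool.and_eq_true, decide_eq_true_eq, not_and, Bool.not_eq_true]
      intro h0
      simpa using hnone p ((PySem.List.mem_pyRange_neg_one).mpr ⟨by omega, by omega⟩)
    | some g =>
      obtain ⟨h1, h2, h3, h4⟩ := find?_pyRange_neg_one_some _ _ _ _ _ rfl hG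
      by_cases hgl : g ≤ lp
      · simp only [hgl, decide_true, Bool.not_eq_eq_eq_not, Bool.not_true]
        rw [List.any_eq_false]
        intro p hp
        have hmem := (PySem.List.mem_pyRange_one).mp hp
        simp only [Bool.and_eq_true, decide_eq_true_eq, not_and, Bool.not_eq_true]
        intro h0
        exact h4 p (by omega) (by omega)
      · simp only [hgl, decide_false, Bool.not_eq_eq_eq_not, Bool.not_false]
        rw [List.any_eq_true]
        refine ⟨g, (PySem.List.mem_pyRange_one).mpr ⟨by omega, by omega⟩, ?_⟩
        simp only [Bool.and_eq_true, decide_eq_true_eq]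
        exact ⟨⟨by omega, by omega⟩, h3⟩
  · simp [hpl]

-- a last-match foldl equals find? on the reversed list
lemma foldl_keep_last (q : Int → Bool) :
    ∀ (l : List Int) (acc : Option Int),
      l.foldl (fun best lp => if q lp then some lp else best) acc
      = (match l.reverse.find? q with | some x => some x | none => acc) := by
  intro l
  induction l with
  | nil => intro acc; simp
  | cons x xs ih =>
    intro acc
    simp only [List.foldl_cons, List.reverse_cons, List.find?_append]
    rw [ih]
    cases hxs : xs.reverse.find? q with
    | some y => simp
    | none => cases hq : q x <;> simp [List.find?, hq]

-- ===== VERDICT (by name: the statement is the Claim_ definition above) =====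
theorem choose_inheritance_source_py_spec : Claim_equal_choose_inheritance_source_py := by
  intro pos_in_group labeled_positions hard_edges _
  show choose_inheritance_source_py pos_in_group labeled_positions hard_edges
      = choose_inheritance_source_py_alt pos_in_group labeled_positions hard_edges
  unfold choose_inheritance_source_py choose_inheritance_source_py_alt
  dsimp only
  rw [← fwd_pred_eq, foldl_keep_last, ← bwd_pred_eq]
  cases labeled_positions.find?
      (fun lp => decide (pos_in_group < lp) && !(pathHasHardBoundary hard_edges pos_in_group lp)) with
  | some s => rfl
  | none =>
    cases labeled_positions.reverse.find?
        (fun lp => decide (lp < pos_in_group) && !(pathHasHardBoundary hard_edges pos_in_group lp)) with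
    | some x => rfl
    | none => rfl
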